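-- pv_equiv track=rewrite | github.com/WuYudaPKU/DS101_PekingUniversity | Tree_question/Tree_Summing.py | number_buffer
-- ===== SOURCE A (Python) =====
-- def number_buffer(l:list):
--     buffer,output=[],[]
--     for i in l:
--         if i in '()':
--             output.append("".join(buffer))
--             buffer.clear()
--             output.append(i)
--         else:
--             buffer.append(i)
--     return output
-- ===== SOURCE B (Python) =====
-- def number_buffer(l: list):
--     output = []
--     rest = l
--     while True:
--         k = 0
--         while k < len(rest) and rest[k] not in '()':
--             k += 1
--         if k == len(rest):
--             return output
--         output.append("".join(rest[:k]))
--         output.append(rest[k])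
--         rest = rest[k+1:]
-- ===== Notes on version B (the rewrite author's own statement) =====
-- stated objective: alternative
-- what changed: B replaces A's single element-by-element fold with a pending-character buffer by a span-based outer loop: it repeatedly finds the next separator, emits the joined prefix slice and the separator, and continues on the remaining suffix (never flushing a trailing prefix, like A).
import Mathlib
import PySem

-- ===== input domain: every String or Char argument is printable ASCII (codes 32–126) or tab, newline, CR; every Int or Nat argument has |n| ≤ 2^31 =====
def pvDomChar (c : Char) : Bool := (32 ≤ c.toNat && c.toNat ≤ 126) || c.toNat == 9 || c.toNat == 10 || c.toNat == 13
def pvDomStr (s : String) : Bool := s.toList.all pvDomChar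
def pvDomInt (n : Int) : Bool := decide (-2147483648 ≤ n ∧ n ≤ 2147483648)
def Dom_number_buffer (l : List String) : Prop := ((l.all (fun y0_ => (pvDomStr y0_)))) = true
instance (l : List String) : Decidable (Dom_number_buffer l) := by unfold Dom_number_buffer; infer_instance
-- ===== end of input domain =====

-- B replaces A's single element-by-element fold with a pending buffer by a span-based loop that
-- repeatedly finds the next separator and emits the joined prefix slice; same exact behaviour.


-- ===== PORT A =====
-- 'i in "()"' is Python's substring test: PySem.Str.isIn i "()"
def number_buffer (l : List String) : List String :=
  (l.foldl
    (fun (st : List String × List String) i =>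
      if PySem.Str.isIn i "()" then ([], st.2 ++ [PySem.Str.join "" st.1, i])
      else (st.1 ++ [i], st.2))
    ([], [])).2

-- ===== PORT B =====
def number_buffer_altGo : List String → List String
  | rest =>
    match hh : rest.dropWhile (fun x => !PySem.Str.isIn x "()") with
    | [] => []
    | s :: t =>
      PySem.Str.join "" (rest.takeWhile (fun x => !PySem.Str.isIn x "()")) :: s ::
        number_buffer_altGo t
  termination_by rest => rest.length
  decreasing_by
    have h1 : (rest.dropWhile (fun x => !PySem.Str.isIn x "()")).length ≤ rest.length :=
      List.length_dropWhile_le _ _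
    rw [hh] at h1; simp at h1; omega

def number_buffer_alt (l : List String) : List String := number_buffer_altGo l

-- ===== PRECONDITION & SPEC =====
def Spec_number_buffer (l : List String) (out : List String) : Prop := out = number_buffer_alt l
instance (l : List String) (out : List String) : Decidable (Spec_number_buffer l out) := by unfold Spec_number_buffer; infer_instance

-- ===== CLAIM (what is proved, stated in full; the proofs are below) =====
def Claim_equal_number_buffer : Prop := ∀ (l : List String), Dom_number_buffer l → Spec_number_buffer l (number_buffer l)

-- ===== LEMMAS AND PROOFS =====

-- A's fold, with the trailing buffer made explicit
def pvGAux (b : List String) : List String → List String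
  | [] => []
  | i :: t =>
    if PySem.Str.isIn i "()" then PySem.Str.join "" b :: i :: pvGAux [] t
    else pvGAux (b ++ [i]) t

theorem pv_altGo_eq (l : List String) :
    number_buffer_altGo l =
      match l.dropWhile (fun x => !PySem.Str.isIn x "()") with
      | [] => []
      | s :: t =>
        PySem.Str.join "" (l.takeWhile (fun x => !PySem.Str.isIn x "()")) :: s ::
          number_buffer_altGo t := by
  rw [number_buffer_altGo]
  split <;> rename_i hd <;> rw [hd]

theorem pv_foldl_eq_gAux (l : List String) (b o : List String) :
    (l.foldl
      (fun (st : List String × List String) i =>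
        if PySem.Str.isIn i "()" then ([], st.2 ++ [PySem.Str.join "" st.1, i])
        else (st.1 ++ [i], st.2))
      (b, o)).2 = o ++ pvGAux b l := by
  induction l generalizing b o with
  | nil => simp [pvGAux]
  | cons i t ih =>
    rw [List.foldl_cons]
    by_cases h : PySem.Str.isIn i "()" = true
    · rw [if_pos h, pvGAux, if_pos h, ih]
      simp
    · rw [if_neg h, pvGAux, if_neg h, ih]

theorem pv_gAux_eq_altGo (l : List String) (b : List String) :
    pvGAux b l =
      match l.dropWhile (fun x => !PySem.Str.isIn x "()") with
      | [] => []
      | s :: t =>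
        PySem.Str.join "" (b ++ l.takeWhile (fun x => !PySem.Str.isIn x "()")) :: s ::
          number_buffer_altGo t := by
  induction l generalizing b with
  | nil => simp [pvGAux]
  | cons i t ih =>
    cases hb : PySem.Str.isIn i "()" with
    | true =>
      have hp : (!PySem.Str.isIn i "()") = false := by rw [hb]; rfl
      rw [pvGAux, if_pos hb, List.dropWhile_cons, List.takeWhile_cons, hp]
      simp only [Bool.false_eq_true, if_false, List.append_nil]
      have h0 := ih []
      simp only [List.nil_append] at h0
      rw [h0, ← pv_altGo_eq]
    | false =>
      have hp : (!PySem.Str.isIn i "()") = true := by rw [hb]; rfl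
      rw [pvGAux, if_neg (by rw [hb]; exact Bool.false_ne_true), List.dropWhile_cons, List.takeWhile_cons, hp]
      simp only [if_pos]
      rw [ih (b ++ [i])]
      cases List.dropWhile (fun x => !PySem.Str.isIn x "()") t with
      | nil => rfl
      | cons s u => simp

-- ===== VERDICT (by name: the statement is the Claim_ definition above) =====
theorem number_buffer_spec : Claim_equal_number_buffer := by
  intro l _
  unfold Spec_number_buffer number_buffer number_buffer_alt
  rw [pv_foldl_eq_gAux, pv_gAux_eq_altGo, pv_altGo_eq]
  simp only [List.nil_append]
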